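-- pv_equiv track=rewrite | github.com/WISDEM/WISDEM | wisdem/aeroelasticse/FileTools.py | select_cases
-- ===== SOURCE A (Python) =====
-- def select_cases(cases, var_sel, val_sel):
--     # Find a variable value from the AeroelasticSE case_matrix
--
--     n_var = len(var_sel)
--     n_cases = len(cases[var_sel[0]])
--
--     truth = [True]*n_cases
--     for vari, vali in zip(var_sel, val_sel):
--         test = [valj == vali for valj in cases[vari]]
--         truth = [truthi and testi for truthi, testi in zip(truth, test)]
--
--     case_idx = [i for i, x in enumerate(truth) if x]
--     return case_idx
-- ===== SOURCE B (Python) =====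
-- def select_cases(cases, var_sel, val_sel):
--     # Find a variable value from the AeroelasticSE case_matrix
--     columns = [cases[var] for var, _ in zip(var_sel, val_sel)]
--     return [i for i, row in enumerate(zip(*columns))
--             if all(x == val for x, val in zip(row, val_sel))]
-- ===== Notes on version B (the rewrite author's own statement) =====
-- stated objective: alternative
-- what changed: B transposes the selected columns into per-case rows (zip(*columns)) and filters case indices in one enumerate pass, instead of building one boolean mask per variable and AND-folding the masks column by column; Pre_ excludes empty var_sel (A raises IndexError), selected keys missing from cases (KeyError), and empty val_sel, a corner where A's vacuous mask selects every case while B's empty column join selects none, neither being specified for an empty selection.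
-- outside the precondition, e.g. on select_cases({'x': ['a', 'b']}, ['x'], []): A returns [0, 1], B returns []
import Mathlib
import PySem

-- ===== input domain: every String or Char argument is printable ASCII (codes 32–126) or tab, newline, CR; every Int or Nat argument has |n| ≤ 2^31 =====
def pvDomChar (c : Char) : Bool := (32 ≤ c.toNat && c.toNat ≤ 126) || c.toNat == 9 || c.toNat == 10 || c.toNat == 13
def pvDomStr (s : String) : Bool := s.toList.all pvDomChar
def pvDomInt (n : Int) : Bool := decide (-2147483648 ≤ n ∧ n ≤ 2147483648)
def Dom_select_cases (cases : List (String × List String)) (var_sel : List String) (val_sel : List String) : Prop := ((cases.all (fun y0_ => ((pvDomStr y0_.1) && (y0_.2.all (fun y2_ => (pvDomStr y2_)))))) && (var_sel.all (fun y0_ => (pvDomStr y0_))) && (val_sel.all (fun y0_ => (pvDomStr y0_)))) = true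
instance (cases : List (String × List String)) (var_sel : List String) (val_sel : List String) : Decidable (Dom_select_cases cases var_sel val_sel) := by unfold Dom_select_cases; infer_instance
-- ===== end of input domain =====

-- B transposes the selected columns into per-case rows and filters the case indices in a single
-- enumerate pass, instead of building one boolean mask per variable and AND-folding the masks.

-- dict-column lookup: cases[k] (Pre_ makes the selected keys present)
def pvCol (cases : List (String × List String)) (k : String) : List String :=
  ((PySem.Dict.mk cases).get? k).getD []

-- ===== PORT A =====
def select_cases (cases : List (String × List String)) (var_sel : List String) (val_sel : List String) : List Int :=
  let n_cases := (pvCol cases ((PySem.List.pyGet? var_sel 0).getD "")).length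
  let truth := (var_sel.zip val_sel).foldl
    (fun truth p =>
      let test := (pvCol cases p.1).map (fun valj => valj == p.2)
      List.zipWith (fun truthi testi => truthi && testi) truth test)
    (List.replicate n_cases true)
  ((PySem.List.enumerate truth 0).filter (fun q => q.2)).map (fun q => q.1)

-- ===== PORT B =====
-- zip(*columns): truncating transpose (Python's zip of the columns; [] for no columns)
def pvZipStar (cols : List (List String)) : List (List String) :=
  match cols with
  | [] => []
  | c :: cs =>
    (List.range (cs.foldl (fun m c' => min m c'.length) c.length)).map
      (fun i => cols.map (fun c' => c'.getD i ""))

def select_cases_alt (cases : List (String × List String)) (var_sel : List String) (val_sel : List String) : List Int :=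
  let columns := (var_sel.zip val_sel).map (fun p => pvCol cases p.1)
  ((PySem.List.enumerate (pvZipStar columns) 0).filter
      (fun q => (q.2.zip val_sel).all (fun r => r.1 == r.2))).map (fun q => q.1)

-- ===== PRECONDITION & SPEC =====
-- Pre_ excludes: empty var_sel (A raises IndexError on var_sel[0]); a selected variable missing
-- from the dict (A raises KeyError); and empty val_sel, a corner where A's vacuous mask selects
-- every case while B's empty column join selects none — neither is specified for an empty selection.
def Pre_select_cases (cases : List (String × List String)) (var_sel : List String) (val_sel : List String) : Prop :=
  var_sel ≠ [] ∧ val_sel ≠ [] ∧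
  ∀ p ∈ var_sel.zip val_sel, ((PySem.Dict.mk cases).get? p.1).isSome = true
instance (cases : List (String × List String)) (var_sel : List String) (val_sel : List String) : Decidable (Pre_select_cases cases var_sel val_sel) := by unfold Pre_select_cases; infer_instance

def pvWitness_select_cases : (List (String × List String)) × List String × List String :=
  ([("x", ["a", "b", "a"]), ("y", ["1", "2", "1"])], ["x", "y"], ["a", "1"])

def Spec_select_cases (cases : List (String × List String)) (var_sel : List String) (val_sel : List String) (out : List Int) : Prop := out = select_cases_alt cases var_sel val_sel
instance (cases : List (String × List String)) (var_sel : List String) (val_sel : List String) (out : List Int) : Decidable (Spec_select_cases cases var_sel val_sel out) := by unfold Spec_select_cases; infer_instance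

-- ===== CLAIM (what is proved, stated in full; the proofs are below) =====
def Claim_equal_select_cases : Prop := ∀ (cases : List (String × List String)) (var_sel : List String) (val_sel : List String), Dom_select_cases cases var_sel val_sel → Pre_select_cases cases var_sel val_sel → Spec_select_cases cases var_sel val_sel (select_cases cases var_sel val_sel)

-- ===== LEMMAS AND PROOFS =====

theorem pv_foldl_min_le_init (sel : List (String × String)) (f : String × String → Nat) (m : Nat) :
    sel.foldl (fun m p => min m (f p)) m ≤ m := by
  induction sel generalizing m with
  | nil => simp
  | cons p rest ih => exact le_trans (ih _) (min_le_left _ _)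

theorem pv_len_fold (cases : List (String × List String)) (sel : List (String × String)) (t0 : List Bool) :
    (sel.foldl (fun truth p =>
        List.zipWith (fun truthi testi => truthi && testi) truth
          ((pvCol cases p.1).map (fun valj => valj == p.2))) t0).length
      = sel.foldl (fun m p => min m (pvCol cases p.1).length) t0.length := by
  induction sel generalizing t0 with
  | nil => rfl
  | cons p rest ih => simp [ih, List.length_zipWith]

theorem pv_get_fold (cases : List (String × List String)) (sel : List (String × String))
    (t0 : List Bool) (i : Nat)
    (h : i < (sel.foldl (fun truth p =>
        List.zipWith (fun truthi testi => truthi && testi) truth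
          ((pvCol cases p.1).map (fun valj => valj == p.2))) t0).length) :
    (sel.foldl (fun truth p =>
        List.zipWith (fun truthi testi => truthi && testi) truth
          ((pvCol cases p.1).map (fun valj => valj == p.2))) t0).getD i false
      = (t0.getD i false && sel.all (fun p => (pvCol cases p.1).getD i "" == p.2)) := by
  induction sel generalizing t0 with
  | nil => simp
  | cons p rest ih =>
    simp only [List.foldl_cons] at h ⊢
    have hlen : (rest.foldl (fun truth p =>
        List.zipWith (fun truthi testi => truthi && testi) truth
          ((pvCol cases p.1).map (fun valj => valj == p.2)))
        (List.zipWith (fun truthi testi => truthi && testi) t0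
          ((pvCol cases p.1).map (fun valj => valj == p.2)))).length
        ≤ (List.zipWith (fun truthi testi => truthi && testi) t0
          ((pvCol cases p.1).map (fun valj => valj == p.2))).length := by
      rw [pv_len_fold]
      exact pv_foldl_min_le_init _ _ _
    have hi : i < (List.zipWith (fun truthi testi => truthi && testi) t0
        ((pvCol cases p.1).map (fun valj => valj == p.2))).length := lt_of_lt_of_le h hlen
    have hmin := hi
    rw [List.length_zipWith, lt_min_iff, List.length_map] at hmin
    rw [ih _ h]
    have hz : (List.zipWith (fun truthi testi => truthi && testi) t0
        ((pvCol cases p.1).map (fun valj => valj == p.2))).getD i false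
        = (t0.getD i false && ((pvCol cases p.1).getD i "" == p.2)) := by
      rw [List.getD_eq_getElem _ _ hi, List.getElem_zipWith,
        List.getD_eq_getElem _ _ hmin.1, List.getElem_map,
        List.getD_eq_getElem _ _ hmin.2]
    rw [hz, List.all_cons, Bool.and_assoc]

theorem pv_enum_filter {α : Type} [Inhabited α] (t : List α) (p : α → Bool) : ∀ s : Int,
    ((PySem.List.enumerate t s).filter (fun q => p q.2)).map (fun q => q.1)
      = ((List.range t.length).filter (fun i => p (t.getD i default))).map (fun i : Nat => s + (i : Int)) := by
  induction t with
  | nil => intro s; rfl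
  | cons x xs ih =>
    intro s
    rw [PySem.List.enumerate_cons, List.length_cons, List.range_succ_eq_map]
    by_cases hx : p x = true <;>
      simp [hx, List.filter_map, ih (s + 1), List.map_map, Function.comp_def, add_comm, add_left_comm]

theorem pv_enum_filter_map_range (M : Nat) (g : Nat → List String) (p : List String → Bool) :
    ((PySem.List.enumerate ((List.range M).map g) 0).filter
      (fun q => p q.2)).map (fun q => q.1)
    = ((List.range M).filter (fun i => p (g i))).map (fun i : Nat => (i : Int)) := by
  rw [pv_enum_filter ((List.range M).map g) p 0]
  simp only [List.length_map, List.length_range, zero_add]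
  congr 1
  apply List.filter_congr
  intro i hi
  rw [List.mem_range] at hi
  rw [List.getD_eq_getElem _ _ (by simpa using hi), List.getElem_map, List.getElem_range]

-- the row condition at index i equals A's per-pair condition
theorem pv_row_cond (cases : List (String × List String)) (i : Nat) :
    ∀ (vars vals : List String),
    (((vars.zip vals).map (fun p => (pvCol cases p.1).getD i "")).zip vals).all (fun r => r.1 == r.2)
      = (vars.zip vals).all (fun p => (pvCol cases p.1).getD i "" == p.2) := by
  intro vars
  induction vars with
  | nil => intro vals; rfl
  | cons v vs ih =>
    intro vals
    cases vals with
    | nil => rfl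
    | cons w ws =>
      simp only [List.zip_cons_cons, List.map_cons, List.all_cons]
      rw [ih ws]

theorem select_cases_eq_alt (cases : List (String × List String)) (var_sel val_sel : List String)
    (hvar : var_sel ≠ []) (hval : val_sel ≠ []) :
    select_cases cases var_sel val_sel = select_cases_alt cases var_sel val_sel := by
  obtain ⟨v0, vs, rfl⟩ := List.exists_cons_of_ne_nil hvar
  obtain ⟨w0, ws, rfl⟩ := List.exists_cons_of_ne_nil hval
  unfold select_cases select_cases_alt pvZipStar
  simp only [List.zip_cons_cons, List.map_cons, PySem.List.pyGet?_zero_cons, Option.getD_some]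
  set sel := (v0, w0) :: vs.zip ws with hsel
  set n0 := (pvCol cases v0).length with hn0
  set t := sel.foldl (fun truth p =>
      List.zipWith (fun truthi testi => truthi && testi) truth
        ((pvCol cases p.1).map (fun valj => valj == p.2)))
    (List.replicate n0 true) with ht
  set M := ((vs.zip ws).map (fun p => pvCol cases p.1)).foldl (fun m c' => min m c'.length) n0 with hM
  -- length of A's truth = B's row count
  have hN : t.length = M := by
    rw [ht, pv_len_fold, List.length_replicate, hsel, List.foldl_cons, min_self, hM,
      List.foldl_map]
  have hNle : t.length ≤ n0 := by
    rw [hN, hM, List.foldl_map]; exact pv_foldl_min_le_init _ _ _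
  rw [pv_enum_filter t (fun b => b) 0,
      pv_enum_filter_map_range M
        (fun i => (pvCol cases v0).getD i "" ::
          ((vs.zip ws).map (fun p => pvCol cases p.1)).map (fun c' => c'.getD i ""))
        (fun row => (row.zip (w0 :: ws)).all (fun r => r.1 == r.2))]
  simp only [zero_add, ← hN]
  congr 1
  apply List.filter_congr
  intro i hi
  rw [List.mem_range] at hi
  simp only [Bool.default_bool]
  rw [pv_get_fold cases sel _ i hi,
    List.getD_eq_getElem _ _ (by simpa using lt_of_lt_of_le hi hNle)]
  simp only [List.getElem_replicate, Bool.true_and, List.map_map]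
  have h := pv_row_cond cases i (v0 :: vs) (w0 :: ws)
  simp only [List.zip_cons_cons, List.map_cons] at h
  simp only [Function.comp_def, List.zip_cons_cons]
  rw [← h]

-- ===== VERDICT (by name: the statement is the Claim_ definition above) =====
theorem select_cases_spec : Claim_equal_select_cases := by
  intro cases var_sel val_sel _ hpre
  unfold Spec_select_cases
  exact select_cases_eq_alt cases var_sel val_sel hpre.1 hpre.2.1
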